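-- pv_equiv track=rewrite | github.com/Kuree/cgra_pnr | anneal/mbcluster.py | __index_clusters
-- ===== SOURCE A (Python) =====
-- def __index_clusters(clusters, netlist):
--     result = {}
--     blk_table = {}
--     for cluster_id in clusters:
--         result[cluster_id] = set()
--         for blk in clusters[cluster_id]:
--             blk_table[blk] = "x" + str(cluster_id)
--
--     for cluster_id in clusters:
--         for blk in clusters[cluster_id]:
--             blk_id = blk_table[blk]
--             for net_id in netlist:
--                 net = netlist[net_id]
--                 if blk_id in net:
--                     result[cluster_id].add(net_id)
--     return result
-- ===== SOURCE B (Python) =====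
-- def __index_clusters(clusters, netlist):
--     # tag every block with its cluster's tag (last write wins, as in A)
--     blk_table = {}
--     for cluster_id in clusters:
--         for blk in clusters[cluster_id]:
--             blk_table[blk] = "x" + str(cluster_id)
--     # invert the netlist once: tag -> net ids (in netlist order) whose net contains it
--     nets_of = {}
--     for net_id in netlist:
--         for elem in dict.fromkeys(netlist[net_id]):
--             nets_of.setdefault(elem, []).append(net_id)
--     # one indexed lookup per block instead of a scan over every net
--     result = {}
--     for cluster_id in clusters:
--         nets = set()
--         for blk in clusters[cluster_id]:
--             nets.update(nets_of.get(blk_table[blk], ()))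
--         result[cluster_id] = nets
--     return result
-- ===== Notes on version B (the rewrite author's own statement) =====
-- stated objective: faster
-- what changed: Instead of scanning the whole netlist for every block of every cluster, B inverts the netlist once into a tag->net-ids index (deduplicating elements per net) and builds each cluster's set by unioning the indexed lists, one dict lookup per block.
import Mathlib
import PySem

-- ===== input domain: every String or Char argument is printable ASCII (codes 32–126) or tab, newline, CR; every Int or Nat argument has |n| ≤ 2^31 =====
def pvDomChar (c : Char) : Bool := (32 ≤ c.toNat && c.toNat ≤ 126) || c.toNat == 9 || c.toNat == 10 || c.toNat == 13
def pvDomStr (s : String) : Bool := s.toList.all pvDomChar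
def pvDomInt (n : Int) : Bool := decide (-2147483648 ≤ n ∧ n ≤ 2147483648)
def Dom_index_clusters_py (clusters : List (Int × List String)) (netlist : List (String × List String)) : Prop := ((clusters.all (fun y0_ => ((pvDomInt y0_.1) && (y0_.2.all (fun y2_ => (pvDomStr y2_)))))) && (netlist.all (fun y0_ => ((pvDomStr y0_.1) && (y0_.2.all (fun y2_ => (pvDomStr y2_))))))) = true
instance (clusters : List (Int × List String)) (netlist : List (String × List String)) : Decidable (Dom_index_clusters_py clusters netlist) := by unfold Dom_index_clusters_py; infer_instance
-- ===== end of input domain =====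

-- B replaces A's scan of the whole netlist for every block by a single inversion of the
-- netlist (tag -> nets containing it) and one indexed union per block.

-- ===== PORT A =====
-- 'for cluster_id in clusters' / 'for net_id in netlist' iterate the dicts as (key, value)
-- pairs; exact for association lists with unique keys (all that represent Python dicts, Pre_).
def index_clusters_py (clusters : List (Int × List String)) (netlist : List (String × List String)) : List (Int × List String) :=
  -- first loop: result[cluster_id] = set(); blk_table[blk] = "x" + str(cluster_id)
  let st : PySem.Dict Int (PySem.Set String) × PySem.Dict String String :=
    clusters.foldl
      (fun st ck =>
        (st.1.insert ck.1 PySem.Set.empty,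
         ck.2.foldl (fun bt blk => bt.insert blk ("x" ++ PySem.Int.toStr ck.1)) st.2))
      (PySem.Dict.empty, PySem.Dict.empty)
  -- second loop: result[cluster_id].add(net_id) whenever blk_id in net
  let result : PySem.Dict Int (PySem.Set String) :=
    clusters.foldl
      (fun res ck =>
        ck.2.foldl
          (fun res blk =>
            netlist.foldl
              (fun res net =>
                if net.2.contains (st.2.getD blk "") then  -- blk_table[blk]: the key is always present
                  res.modify ck.1 PySem.Set.empty (fun s => PySem.Set.add s net.1)
                else res)
              res)
          res)
      st.1
  result.items

-- ===== PORT B =====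
def index_clusters_py_alt (clusters : List (Int × List String)) (netlist : List (String × List String)) : List (Int × List String) :=
  -- blk_table[blk] = "x" + str(cluster_id)
  let blk_table : PySem.Dict String String :=
    clusters.foldl
      (fun bt ck => ck.2.foldl (fun bt blk => bt.insert blk ("x" ++ PySem.Int.toStr ck.1)) bt)
      PySem.Dict.empty
  -- for elem in dict.fromkeys(netlist[net_id]): nets_of.setdefault(elem, []).append(net_id)
  let nets_of : PySem.Dict String (List String) :=
    netlist.foldl
      (fun d net => (PySem.List.dedup net.2).foldl (fun d elem => d.modify elem [] (fun l => l ++ [net.1])) d)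
      PySem.Dict.empty
  -- nets = set(); for blk: nets.update(nets_of.get(blk_table[blk], ())); result[cluster_id] = nets
  let result : PySem.Dict Int (PySem.Set String) :=
    clusters.foldl
      (fun res ck =>
        res.insert ck.1
          (ck.2.foldl (fun nets blk => PySem.Set.update nets (nets_of.getD (blk_table.getD blk "") []))
            PySem.Set.empty))
      PySem.Dict.empty
  result.items

-- ===== PRECONDITION & SPEC =====
-- Pre_ excludes only association lists carrying a duplicate key in either argument: Python
-- dicts cannot have duplicate keys, so such lists represent no input the Python A accepts.
def Pre_index_clusters_py (clusters : List (Int × List String)) (netlist : List (String × List String)) : Prop :=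
  (clusters.map Prod.fst).Nodup ∧ (netlist.map Prod.fst).Nodup
instance (clusters : List (Int × List String)) (netlist : List (String × List String)) : Decidable (Pre_index_clusters_py clusters netlist) := by unfold Pre_index_clusters_py; infer_instance

def pvWitness_index_clusters_py : (List (Int × List String)) × (List (String × List String)) :=
  ([(1, ["a"]), (2, ["b"])], [("n1", ["x1", "c"]), ("n2", ["x2"])])

def Spec_index_clusters_py (clusters : List (Int × List String)) (netlist : List (String × List String)) (out : List (Int × List String)) : Prop := out = index_clusters_py_alt clusters netlist
instance (clusters : List (Int × List String)) (netlist : List (String × List String)) (out : List (Int × List String)) : Decidable (Spec_index_clusters_py clusters netlist out) := by unfold Spec_index_clusters_py; infer_instance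

-- ===== CLAIM (what is proved, stated in full; the proofs are below) =====
def Claim_equal_index_clusters_py : Prop := ∀ (clusters : List (Int × List String)) (netlist : List (String × List String)), Dom_index_clusters_py clusters netlist → Pre_index_clusters_py clusters netlist → Spec_index_clusters_py clusters netlist (index_clusters_py clusters netlist)

-- ===== LEMMAS AND PROOFS =====

-- the net ids (in netlist order) whose net contains tag t — the common value both ports compute
def pvNetsOf (netlist : List (String × List String)) (t : String) : List String :=
  (netlist.filter (fun net => net.2.contains t)).map Prod.fst

lemma pv_netsOf_cons (net : String × List String) (nl : List (String × List String)) (t : String) :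
    pvNetsOf (net :: nl) t = (if t ∈ net.2 then [net.1] else []) ++ pvNetsOf nl t := by
  by_cases hmem : t ∈ net.2 <;> simp [pvNetsOf, hmem]

lemma pv_foldl_pair {α β γ : Type} (l : List α) (f : β → α → β) (g : γ → α → γ) (b : β) (c : γ) :
    l.foldl (fun st x => (f st.1 x, g st.2 x)) (b, c) = (l.foldl f b, l.foldl g c) := by
  induction l generalizing b c with
  | nil => rfl
  | cons a l ih => simpa using ih (f b a) (g c a)

-- the pair carried by A's first loop splits into its two independent folds
lemma pv_phase1_split (clusters : List (Int × List String)) :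
    clusters.foldl
        (fun st ck =>
          (st.1.insert ck.1 PySem.Set.empty,
           ck.2.foldl (fun bt blk => bt.insert blk ("x" ++ PySem.Int.toStr ck.1)) st.2))
        ((PySem.Dict.empty : PySem.Dict Int (PySem.Set String)), (PySem.Dict.empty : PySem.Dict String String))
      = (clusters.foldl (fun d ck => d.insert ck.1 PySem.Set.empty) PySem.Dict.empty,
         clusters.foldl (fun bt ck => ck.2.foldl (fun bt blk => bt.insert blk ("x" ++ PySem.Int.toStr ck.1)) bt) PySem.Dict.empty) :=
  pv_foldl_pair clusters (fun d ck => d.insert ck.1 PySem.Set.empty)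
    (fun bt ck => ck.2.foldl (fun bt blk => bt.insert blk ("x" ++ PySem.Int.toStr ck.1)) bt)
    PySem.Dict.empty PySem.Dict.empty

lemma pv_filter_beq_of_nodup {α : Type} [BEq α] [LawfulBEq α] (l : List α) (hl : l.Nodup) (x : α) :
    l.filter (· == x) = if x ∈ l then [x] else [] := by
  induction l with
  | nil => simp
  | cons a l ih =>
    rcases List.nodup_cons.mp hl with ⟨ha, hl'⟩
    by_cases hax : a = x
    · subst hax
      simp [ih hl', ha]
    · simp [hax, ih hl', Ne.symm hax]

-- B's inverted index: nets_of[t] is exactly pvNetsOf netlist t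
lemma pv_netsof_getD (nl : List (String × List String)) (d : PySem.Dict String (List String)) (t : String) :
    (nl.foldl (fun d net => (PySem.List.dedup net.2).foldl (fun d elem => d.modify elem [] (fun l => l ++ [net.1])) d) d).getD t []
      = d.getD t [] ++ pvNetsOf nl t := by
  induction nl generalizing d with
  | nil => simp [pvNetsOf]
  | cons net nl ih =>
    rw [List.foldl_cons, ih]
    have hinner : ((PySem.List.dedup net.2).foldl (fun d elem => d.modify elem [] (fun l => l ++ [net.1])) d).getD t []
        = d.getD t [] ++ (if t ∈ net.2 then [net.1] else []) := by
      have hmap : (PySem.List.dedup net.2).foldl (fun d elem => d.modify elem [] (fun l => l ++ [net.1])) d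
          = ((PySem.List.dedup net.2).map (fun e => (e, net.1))).foldl (fun d p => d.modify p.1 [] (fun l => l ++ [p.2])) d := by
        rw [List.foldl_map]
      rw [hmap, PySem.Dict.getD_foldl_modify_append]
      congr 1
      rw [List.filter_map]
      have hpred : (fun p => p.1 == t) ∘ (fun e => (e, net.1)) = (fun e : String => e == t) := rfl
      rw [hpred, pv_filter_beq_of_nodup _ (PySem.List.nodup_dedup net.2) t]
      by_cases hmem : t ∈ net.2
      · simp [hmem]
      · simp [hmem]
    rw [hinner, pv_netsOf_cons, List.append_assoc]

-- A's innermost loop over the netlist, observed at its own key c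
lemma pv_netloop_getD (nl : List (String × List String)) (c : Int) (t : String)
    (res : PySem.Dict Int (PySem.Set String)) :
    (nl.foldl (fun res net => if net.2.contains t then res.modify c PySem.Set.empty (fun s => PySem.Set.add s net.1) else res) res).getD c PySem.Set.empty
      = PySem.Set.update (res.getD c PySem.Set.empty) (pvNetsOf nl t) := by
  induction nl generalizing res with
  | nil => simp [pvNetsOf, PySem.Set.update]
  | cons net nl ih =>
    rw [List.foldl_cons]
    by_cases hc : net.2.contains t
    · have hmem : t ∈ net.2 := by simpa using hc
      rw [if_pos hc, ih, PySem.Dict.getD_modify_self, pv_netsOf_cons]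
      simp [hmem, PySem.Set.update_cons]
    · have hmem : t ∉ net.2 := by simpa using hc
      rw [if_neg hc, ih, pv_netsOf_cons]
      simp [hmem]

-- ... and observed at any other key: unchanged
lemma pv_netloop_getD_ne (nl : List (String × List String)) (c c' : Int) (h : c' ≠ c) (t : String)
    (res : PySem.Dict Int (PySem.Set String)) :
    (nl.foldl (fun res net => if net.2.contains t then res.modify c PySem.Set.empty (fun s => PySem.Set.add s net.1) else res) res).getD c' PySem.Set.empty
      = res.getD c' PySem.Set.empty := by
  induction nl generalizing res with
  | nil => rfl
  | cons net nl ih =>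
    rw [List.foldl_cons]
    by_cases hc : net.2.contains t
    · rw [if_pos hc, ih, PySem.Dict.getD_modify_of_ne _ _ _ h]
    · rw [if_neg hc, ih]

-- keys are untouched by the innermost loop (the modified key is already present)
lemma pv_netloop_keys (nl : List (String × List String)) (c : Int) (t : String)
    (res : PySem.Dict Int (PySem.Set String)) (hc : c ∈ res.keys) :
    (nl.foldl (fun res net => if net.2.contains t then res.modify c PySem.Set.empty (fun s => PySem.Set.add s net.1) else res) res).keys
      = res.keys := by
  induction nl generalizing res with
  | nil => rfl
  | cons net nl ih =>
    rw [List.foldl_cons]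
    by_cases hcc : net.2.contains t
    · rw [if_pos hcc]
      have hkeys : (res.modify c PySem.Set.empty (fun s => PySem.Set.add s net.1)).keys = res.keys := by
        rw [PySem.Dict.keys_modify, PySem.Dict.keys_insert_of_contains]
        exact (PySem.Dict.contains_iff_mem_keys res c).mpr hc
      rw [ih _ (hkeys ▸ hc), hkeys]
    · rw [if_neg hcc, ih _ hc]

-- A's middle loop over the blocks of one cluster, observed at that cluster's key
lemma pv_blkloop_getD (blks : List String) (netlist : List (String × List String)) (c : Int)
    (bt : PySem.Dict String String) (res : PySem.Dict Int (PySem.Set String)) (hc : c ∈ res.keys) :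
    (blks.foldl (fun res blk => netlist.foldl (fun res net => if net.2.contains (bt.getD blk "") then res.modify c PySem.Set.empty (fun s => PySem.Set.add s net.1) else res) res) res).getD c PySem.Set.empty
      = blks.foldl (fun s blk => PySem.Set.update s (pvNetsOf netlist (bt.getD blk ""))) (res.getD c PySem.Set.empty) := by
  induction blks generalizing res with
  | nil => rfl
  | cons blk blks ih =>
    rw [List.foldl_cons, List.foldl_cons]
    have hkeys := pv_netloop_keys netlist c (bt.getD blk "") res hc
    rw [ih _ (hkeys ▸ hc), pv_netloop_getD]

lemma pv_blkloop_getD_ne (blks : List String) (netlist : List (String × List String)) (c c' : Int)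
    (h : c' ≠ c) (bt : PySem.Dict String String) (res : PySem.Dict Int (PySem.Set String)) :
    (blks.foldl (fun res blk => netlist.foldl (fun res net => if net.2.contains (bt.getD blk "") then res.modify c PySem.Set.empty (fun s => PySem.Set.add s net.1) else res) res) res).getD c' PySem.Set.empty
      = res.getD c' PySem.Set.empty := by
  induction blks generalizing res with
  | nil => rfl
  | cons blk blks ih => rw [List.foldl_cons, ih, pv_netloop_getD_ne _ _ _ h]

lemma pv_blkloop_keys (blks : List String) (netlist : List (String × List String)) (c : Int)
    (bt : PySem.Dict String String) (res : PySem.Dict Int (PySem.Set String)) (hc : c ∈ res.keys) :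
    (blks.foldl (fun res blk => netlist.foldl (fun res net => if net.2.contains (bt.getD blk "") then res.modify c PySem.Set.empty (fun s => PySem.Set.add s net.1) else res) res) res).keys
      = res.keys := by
  induction blks generalizing res with
  | nil => rfl
  | cons blk blks ih =>
    rw [List.foldl_cons]
    have hkeys := pv_netloop_keys netlist c (bt.getD blk "") res hc
    rw [ih _ (hkeys ▸ hc), hkeys]

-- A's outer loop: value at a key not occurring among the clusters is unchanged
lemma pv_phase2_getD_notmem (cs : List (Int × List String)) (netlist : List (String × List String))
    (bt : PySem.Dict String String) (c : Int) (hnot : c ∉ cs.map Prod.fst)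
    (res : PySem.Dict Int (PySem.Set String)) :
    (cs.foldl (fun res ck => ck.2.foldl (fun res blk => netlist.foldl (fun res net => if net.2.contains (bt.getD blk "") then res.modify ck.1 PySem.Set.empty (fun s => PySem.Set.add s net.1) else res) res) res) res).getD c PySem.Set.empty
      = res.getD c PySem.Set.empty := by
  induction cs generalizing res with
  | nil => rfl
  | cons ck cs ih =>
    rw [List.foldl_cons]
    have h1 : c ∉ cs.map Prod.fst := fun h => hnot (by simp [h])
    have h2 : c ≠ ck.1 := fun h => hnot (by simp [h])
    rw [ih h1, pv_blkloop_getD_ne _ _ _ _ h2]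

lemma pv_phase2_keys (cs : List (Int × List String)) (netlist : List (String × List String))
    (bt : PySem.Dict String String) (res : PySem.Dict Int (PySem.Set String))
    (hk : ∀ ck ∈ cs, ck.1 ∈ res.keys) :
    (cs.foldl (fun res ck => ck.2.foldl (fun res blk => netlist.foldl (fun res net => if net.2.contains (bt.getD blk "") then res.modify ck.1 PySem.Set.empty (fun s => PySem.Set.add s net.1) else res) res) res) res).keys
      = res.keys := by
  induction cs generalizing res with
  | nil => rfl
  | cons ck cs ih =>
    rw [List.foldl_cons]
    have hkeys := pv_blkloop_keys ck.2 netlist ck.1 bt res (hk ck List.mem_cons_self)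
    rw [ih _ (fun ck' h => hkeys ▸ hk ck' (List.mem_cons_of_mem _ h)), hkeys]

-- A's outer loop: the final value at the key of a cluster ck is ck's own accumulation
lemma pv_phase2_getD (cs : List (Int × List String)) (netlist : List (String × List String))
    (bt : PySem.Dict String String) (hnd : (cs.map Prod.fst).Nodup)
    (res : PySem.Dict Int (PySem.Set String)) (hk : ∀ ck ∈ cs, ck.1 ∈ res.keys)
    (ck : Int × List String) (hmem : ck ∈ cs) :
    (cs.foldl (fun res ck => ck.2.foldl (fun res blk => netlist.foldl (fun res net => if net.2.contains (bt.getD blk "") then res.modify ck.1 PySem.Set.empty (fun s => PySem.Set.add s net.1) else res) res) res) res).getD ck.1 PySem.Set.empty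
      = ck.2.foldl (fun s blk => PySem.Set.update s (pvNetsOf netlist (bt.getD blk ""))) (res.getD ck.1 PySem.Set.empty) := by
  induction cs generalizing res with
  | nil => exact absurd hmem List.not_mem_nil
  | cons d cs ih =>
    rw [List.foldl_cons]
    rcases List.nodup_cons.mp hnd with ⟨hd, hnd'⟩
    have hdk : d.1 ∈ res.keys := hk d List.mem_cons_self
    have hkeys := pv_blkloop_keys d.2 netlist d.1 bt res hdk
    rcases List.mem_cons.mp hmem with rfl | hmem'
    · rw [pv_phase2_getD_notmem cs netlist bt ck.1 hd, pv_blkloop_getD _ _ _ _ _ hdk]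
    · have hne : ck.1 ≠ d.1 := fun h => hd (h ▸ List.mem_map_of_mem hmem')
      rw [ih hnd' _ (fun ck' h => hkeys ▸ hk ck' (List.mem_cons_of_mem _ h)) hmem',
        pv_blkloop_getD_ne _ _ _ _ hne]

-- phase 1 of A: every value starts as the empty set
lemma pv_phase1_getD (cs : List (Int × List String)) (d : PySem.Dict Int (PySem.Set String)) (c : Int)
    (hd : d.getD c PySem.Set.empty = PySem.Set.empty) :
    (cs.foldl (fun d ck => d.insert ck.1 PySem.Set.empty) d).getD c PySem.Set.empty = PySem.Set.empty := by
  induction cs generalizing d with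
  | nil => exact hd
  | cons ck cs ih =>
    rw [List.foldl_cons]
    apply ih
    rw [PySem.Dict.getD_insert]
    split
    · rfl
    · exact hd

lemma pv_phase1_keys (cs : List (Int × List String)) (hnd : (cs.map Prod.fst).Nodup) :
    (cs.foldl (fun d ck => d.insert ck.1 PySem.Set.empty) (PySem.Dict.empty : PySem.Dict Int (PySem.Set String))).keys = cs.map Prod.fst := by
  have h := PySem.Dict.keys_foldl_insert_key (κ := Int) (ν := PySem.Set String) cs (fun ck => ck.1)
    (fun _ _ => PySem.Set.empty) PySem.Dict.empty
  simpa [PySem.Set.update_nil_left, PySem.Set.ofList_eq_self_of_nodup _ hnd] using h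

-- ===== VERDICT (by name: the statement is the Claim_ definition above) =====
theorem index_clusters_py_spec : Claim_equal_index_clusters_py := by
  intro clusters netlist _ hpre
  rcases hpre with ⟨hndc, hndn⟩
  unfold Spec_index_clusters_py
  simp only [index_clusters_py, index_clusters_py_alt]
  rw [pv_phase1_split]
  dsimp only
  set bt := clusters.foldl (fun bt ck => ck.2.foldl (fun bt blk => bt.insert blk ("x" ++ PySem.Int.toStr ck.1)) bt) (PySem.Dict.empty : PySem.Dict String String) with hbt
  set res0 := clusters.foldl (fun d ck => d.insert ck.1 PySem.Set.empty) (PySem.Dict.empty : PySem.Dict Int (PySem.Set String)) with hres0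
  set nod := netlist.foldl (fun d net => (PySem.List.dedup net.2).foldl (fun d elem => d.modify elem [] (fun l => l ++ [net.1])) d) (PySem.Dict.empty : PySem.Dict String (List String)) with hnod
  have hkeys0 : res0.keys = clusters.map Prod.fst := by rw [hres0]; exact pv_phase1_keys clusters hndc
  have hk : ∀ ck ∈ clusters, ck.1 ∈ res0.keys := by
    intro ck h; rw [hkeys0]; exact List.mem_map_of_mem h
  have hkeysA := pv_phase2_keys clusters netlist bt res0 hk
  rw [PySem.Dict.items_eq_map_keys _ (by rw [hkeysA, hkeys0]; exact hndc) PySem.Set.empty,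
     hkeysA, hkeys0]
  rw [PySem.Dict.items_foldl_insert_fresh clusters (fun ck => ck.1)
      (fun ck => ck.2.foldl (fun nets blk => PySem.Set.update nets (nod.getD (bt.getD blk "") [])) PySem.Set.empty)
      PySem.Dict.empty (fun ck _ => rfl) (by exact hndc)]
  have hempty : (PySem.Dict.empty : PySem.Dict Int (PySem.Set String)).items = [] := rfl
  rw [hempty, List.nil_append, List.map_map]
  apply List.map_congr_left
  intro ck hmem
  have hval := pv_phase2_getD clusters netlist bt hndc res0 hk ck hmem
  rw [show res0.getD ck.1 PySem.Set.empty = PySem.Set.empty from by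
        rw [hres0]; exact pv_phase1_getD clusters PySem.Dict.empty ck.1 rfl] at hval
  simp only [Function.comp_apply]
  rw [hval]
  have hfun : (fun (s : PySem.Set String) blk => PySem.Set.update s (pvNetsOf netlist (bt.getD blk "")))
      = (fun (s : PySem.Set String) blk => PySem.Set.update s (nod.getD (bt.getD blk "") [])) := by
    funext s blk
    rw [hnod, pv_netsof_getD]
    rfl
  rw [hfun]
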